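-- pv_equiv track=rewrite | github.com/anubhavshrimal/CompetitiveProgrammingInPython | TCS/CodeVita/c.py | find_primes_sieve
-- ===== SOURCE A (Python) =====
-- def find_primes_sieve(num):
--     # list of all numbers upto n
--     intList = [True for i in range(num+1)]
--
--     # first prime
--     p = 2
--
--     while p * p <= num:
--
--         # if intList[p] is True means its a prime number
--         if intList[p]:
--             for i in range(p**2, num+1, p):
--                 intList[i] = False
--
--         p += 1
--
--     lis = []
--     sum_primes = 0
--     prime_set = set({})
--
--     for i in range(2, len(intList)):
--         if intList[i]:
--             if i in prime_set:
--                 lis.append(i)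
--             sum_primes += i
--             prime_set.add(sum_primes)
--
--     return len(lis)
-- ===== SOURCE B (Python) =====
-- def find_primes_sieve(num):
--     # same Sieve of Eratosthenes as before
--     intList = [True for i in range(num + 1)]
--     p = 2
--     while p * p <= num:
--         if intList[p]:
--             for i in range(p ** 2, num + 1, p):
--                 intList[i] = False
--         p += 1
--
--     # primes up to num, their running prefix sums, then one set intersection:
--     # count the primes that equal a prefix sum of strictly earlier primes,
--     # i.e. the prefix sums (other than the first) that are themselves prime.
--     primes = [i for i in range(2, len(intList)) if intList[i]]
--     sums = []
--     s = 0
--     for q in primes: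
--         s += q
--         sums.append(s)
--     return len(set(sums[1:]) & set(primes))
-- ===== Notes on version B (the rewrite author's own statement) =====
-- stated objective: alternative
-- what changed: B keeps the sieve but drops A's online bookkeeping (a growing set of prefix sums consulted while iterating): it builds the prime list and its prefix-sum list once and returns the size of one set intersection between the prefix sums after the first and the primes.
import Mathlib
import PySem

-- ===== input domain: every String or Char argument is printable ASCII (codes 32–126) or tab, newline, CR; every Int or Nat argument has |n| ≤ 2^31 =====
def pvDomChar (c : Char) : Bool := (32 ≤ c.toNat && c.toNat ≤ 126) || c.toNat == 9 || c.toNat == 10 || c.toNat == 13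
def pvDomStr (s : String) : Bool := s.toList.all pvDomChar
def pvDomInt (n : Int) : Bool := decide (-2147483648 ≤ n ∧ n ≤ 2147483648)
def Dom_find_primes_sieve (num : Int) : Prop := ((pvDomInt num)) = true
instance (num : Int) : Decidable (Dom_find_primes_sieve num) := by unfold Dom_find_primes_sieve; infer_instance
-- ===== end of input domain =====

-- B keeps A's sieve but replaces A's online sum-set bookkeeping loop by building the prime
-- list and its prefix sums once and taking one set intersection (alternative decomposition).

-- ===== PORT A =====
-- the Sieve-of-Eratosthenes while-loop; these lines are identical in Source A and Source B, so both ports share this helper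
def pvSieveRun (num p : Int) (l : List Bool) : List Bool :=
  if _h : p * p ≤ num then
    pvSieveRun num (p + 1)
      (if PySem.List.pyGetD l p false then
        (PySem.List.pyRange (p ^ 2) (num + 1) p).foldl (fun acc i => PySem.List.pySetD acc i false) l
      else l)
  else l
termination_by (num + 1 - p).toNat
decreasing_by
  have hp : p ≤ num := by nlinarith [sq_nonneg (p - 1), mul_self_nonneg p]
  omega

def find_primes_sieve (num : Int) : Int :=
  let intList := (PySem.List.pyRange 0 (num + 1) 1).map (fun _ => true)
  let intList := pvSieveRun num 2 intList
  let st :=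
    (PySem.List.pyRange 2 (PySem.List.len intList) 1).foldl
      (fun (st : List Int × Int × PySem.Set Int) i =>
        if PySem.List.pyGetD intList i false then
          ((if PySem.Set.contains st.2.2 i then st.1 ++ [i] else st.1),
            st.2.1 + i,
            PySem.Set.add st.2.2 (st.2.1 + i))
        else st)
      ([], 0, PySem.Set.empty)
  PySem.List.len st.1

-- ===== PORT B =====
def find_primes_sieve_alt (num : Int) : Int :=
  let intList := pvSieveRun num 2 ((PySem.List.pyRange 0 (num + 1) 1).map (fun _ => true))
  let primes := (PySem.List.pyRange 2 (PySem.List.len intList) 1).filter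
      (fun i => PySem.List.pyGetD intList i false)
  let st := primes.foldl (fun (st : List Int × Int) q => (st.1 ++ [st.2 + q], st.2 + q)) ([], 0)
  PySem.Set.len (PySem.Set.inter
    (PySem.Set.ofList (PySem.List.slice st.1 (some 1) none))
    (PySem.Set.ofList primes))

-- ===== PRECONDITION & SPEC =====
def Spec_find_primes_sieve (num : Int) (out : Int) : Prop := out = find_primes_sieve_alt num
instance (num : Int) (out : Int) : Decidable (Spec_find_primes_sieve num out) := by unfold Spec_find_primes_sieve; infer_instance

-- ===== CLAIM (what is proved, stated in full; the proofs are below) =====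
def Claim_equal_find_primes_sieve : Prop := ∀ (num : Int), Dom_find_primes_sieve num → Spec_find_primes_sieve num (find_primes_sieve num)

-- ===== LEMMAS AND PROOFS =====

/-- Prefix sums `[s+l₁, s+l₁+l₂, …]` (proof-only helper). -/
def pvPsums (s : Int) : List Int → List Int
  | [] => []
  | q :: rest => (s + q) :: pvPsums (s + q) rest

lemma pv_psums_append (xs ys : List Int) (s : Int) :
    pvPsums s (xs ++ ys) = pvPsums s xs ++ pvPsums (s + xs.sum) ys := by
  induction xs generalizing s with
  | nil => simp [pvPsums]
  | cons a xs ih =>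
    simp only [List.cons_append, pvPsums, List.sum_cons, List.cons_append]
    rw [ih, ← add_assoc]

lemma pv_mem_psums_lt : ∀ (L : List Int) (s x : Int),
    (∀ q ∈ L, 0 < q) → x ∈ pvPsums s L → s < x
  | [], s, x, _, hx => by simp [pvPsums] at hx
  | a :: L, s, x, hpos, hx => by
    simp only [pvPsums, List.mem_cons] at hx
    have ha := hpos a (List.mem_cons_self ..)
    rcases hx with rfl | hx
    · omega
    · have := pv_mem_psums_lt L (s + a) x (fun q hq => hpos q (List.mem_cons_of_mem _ hq)) hx
      omega

lemma pv_mem_psums_le : ∀ (L : List Int) (s x : Int),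
    (∀ q ∈ L, 0 ≤ q) → x ∈ pvPsums s L → x ≤ s + L.sum
  | [], s, x, _, hx => by simp [pvPsums] at hx
  | a :: L, s, x, hpos, hx => by
    simp only [pvPsums, List.mem_cons] at hx
    have hsum : 0 ≤ L.sum := List.sum_nonneg (fun q hq => hpos q (List.mem_cons_of_mem _ hq))
    rcases hx with rfl | hx
    · simp only [List.sum_cons]; omega
    · have := pv_mem_psums_le L (s + a) x (fun q hq => hpos q (List.mem_cons_of_mem _ hq)) hx
      simp only [List.sum_cons]; omega

lemma pv_pairwise_psums : ∀ (L : List Int) (s : Int),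
    (∀ q ∈ L, 0 < q) → (pvPsums s L).Pairwise (· < ·)
  | [], _, _ => by simp [pvPsums]
  | a :: L, s, hpos => by
    simp only [pvPsums, List.pairwise_cons]
    refine ⟨fun y hy => ?_, pv_pairwise_psums L (s + a) (fun q hq => hpos q (List.mem_cons_of_mem _ hq))⟩
    exact pv_mem_psums_lt L (s + a) y (fun q hq => hpos q (List.mem_cons_of_mem _ hq)) hy

/-- The counting done by A's loop over the prime list (proof-only helper). -/
def pvCountA : List Int → Int → PySem.Set Int → Nat
  | [], _, _ => 0
  | q :: rest, s, st =>
      (if PySem.Set.contains st q then 1 else 0) + pvCountA rest (s + q) (PySem.Set.add st (s + q))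

lemma pv_afold (L : List Int) : ∀ (lis : List Int) (s : Int) (st : PySem.Set Int),
    ((L.foldl (fun (st : List Int × Int × PySem.Set Int) i =>
        ((if PySem.Set.contains st.2.2 i then st.1 ++ [i] else st.1),
          st.2.1 + i,
          PySem.Set.add st.2.2 (st.2.1 + i))) (lis, s, st)).1).length
      = lis.length + pvCountA L s st := by
  induction L with
  | nil => intro lis s st; simp [pvCountA]
  | cons q L ih =>
    intro lis s st
    rw [List.foldl_cons]
    refine Eq.trans (ih (if PySem.Set.contains st q then lis ++ [q] else lis) (s + q)
      (PySem.Set.add st (s + q))) ?_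
    by_cases h : q ∈ st <;> simp [pvCountA, h] <;> omega

/-- A prime q sitting after the prefix `pre` equals an earlier prefix sum iff it equals some
    prefix sum other than the first. -/
lemma pv_mem_iff (pre rest : List Int) (q : Int)
    (hsort : (pre ++ q :: rest).Pairwise (· < ·))
    (hpos : ∀ x ∈ pre ++ q :: rest, 2 ≤ x) :
    (q ∈ pvPsums 0 pre ↔ q ∈ (pvPsums 0 (pre ++ q :: rest)).tail) := by
  cases pre with
  | nil =>
    simp only [List.nil_append, pvPsums, List.tail_cons]
    constructor
    · intro hq; simp at hq
    · intro hq
      have := pv_mem_psums_lt rest (0 + q) q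
        (fun x hx => by have := hpos x (List.mem_cons_of_mem _ hx); omega) hq
      omega
  | cons a pre₀ =>
    have haq : a < q := by
      have := (List.pairwise_cons.mp hsort).1 q
        (List.mem_append_right _ (List.mem_cons_self ..))
      exact this
    have hpos' : ∀ x ∈ pre₀ ++ q :: rest, 2 ≤ x := fun x hx =>
      hpos x (List.mem_cons_of_mem _ hx)
    simp only [List.cons_append, pvPsums, List.tail_cons]
    rw [pv_psums_append pre₀ (q :: rest) (0 + a)]
    constructor
    · intro hq
      rcases List.mem_cons.mp hq with hq0 | hq
      · omega
      · exact List.mem_append_left _ hq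
    · intro hq
      rcases List.mem_append.mp hq with hq | hq
      · exact List.mem_cons_of_mem _ hq
      · exfalso
        have hσ : 2 ≤ 0 + a + pre₀.sum := by
          have ha : 2 ≤ a := hpos a (List.mem_cons_self ..)
          have : 0 ≤ pre₀.sum := List.sum_nonneg (fun x hx => by
            have := hpos' x (List.mem_append_left _ hx); omega)
          omega
        simp only [pvPsums, List.mem_cons] at hq
        rcases hq with hq | hq
        · omega
        · have := pv_mem_psums_lt rest (0 + a + pre₀.sum + q) q
            (fun x hx => by
              have := hpos' x (List.mem_append_right _ (List.mem_cons_of_mem _ hx)); omega) hq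
          omega

lemma pv_countA_split (L : List Int) (hsort : L.Pairwise (· < ·)) (hpos : ∀ q ∈ L, 2 ≤ q) :
    ∀ (suf pre : List Int), L = pre ++ suf →
      pvCountA suf pre.sum (pvPsums 0 pre)
        = (suf.filter (fun x => (pvPsums 0 L).tail.contains x)).length := by
  intro suf
  induction suf with
  | nil => intro pre _; simp [pvCountA]
  | cons q rest ih =>
    intro pre hL
    have hq2 : 2 ≤ q := hpos q (by rw [hL]; exact List.mem_append_right _ (List.mem_cons_self ..))
    have hpre : ∀ x ∈ pre, 2 ≤ x := fun x hx => hpos x (by rw [hL]; exact List.mem_append_left _ hx)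
    have hnotmem : pre.sum + q ∉ pvPsums 0 pre := by
      intro hmem
      have := pv_mem_psums_le pre 0 (pre.sum + q) (fun x hx => by have := hpre x hx; omega) hmem
      omega
    have hadd : PySem.Set.add (pvPsums 0 pre) (pre.sum + q) = pvPsums 0 (pre ++ [q]) := by
      rw [PySem.Set.add_of_not_mem hnotmem, pv_psums_append pre [q] 0]
      simp [pvPsums]
    have hiff : (q ∈ pvPsums 0 pre ↔ q ∈ (pvPsums 0 L).tail) := by
      rw [hL]; exact pv_mem_iff pre rest q (hL ▸ hsort) (hL ▸ hpos)
    have hind : (PySem.Set.contains (pvPsums 0 pre) q)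
        = ((pvPsums 0 L).tail.contains q) := by
      rw [Bool.eq_iff_iff]
      simpa using hiff
    have hrec := ih (pre ++ [q]) (by rw [hL]; simp)
    simp only [pvCountA, List.filter_cons]
    rw [hadd]
    have hsum : (pre ++ [q]).sum = pre.sum + q := by simp
    rw [← hsum, hrec, hind]
    by_cases h : q ∈ (pvPsums 0 L).tail <;> simp [h] <;> omega

lemma pv_bfold (L : List Int) : ∀ (acc : List Int) (s : Int),
    ((L.foldl (fun (st : List Int × Int) q => (st.1 ++ [st.2 + q], st.2 + q)) (acc, s)).1)
      = acc ++ pvPsums s L := by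
  induction L with
  | nil => intro acc s; simp [pvPsums]
  | cons q L ih => intro acc s; simp [pvPsums, ih]

lemma pv_filter_length_comm (xs ys : List Int) (hx : xs.Nodup) (hy : ys.Nodup) :
    (xs.filter (fun a => ys.contains a)).length = (ys.filter (fun a => xs.contains a)).length := by
  have h1 : (xs.filter (fun a => ys.contains a)).toFinset = xs.toFinset ∩ ys.toFinset := by
    ext a; simp
  have h2 : (ys.filter (fun a => xs.contains a)).toFinset = ys.toFinset ∩ xs.toFinset := by
    ext a; simp
  rw [← List.toFinset_card_of_nodup (hx.filter _), ← List.toFinset_card_of_nodup (hy.filter _),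
    h1, h2, Finset.inter_comm]

/-- The generic core: for ANY sieve list, A's counting loop and B's intersection agree. -/
lemma pv_main (bs : List Bool) :
    PySem.List.len (((PySem.List.pyRange 2 (PySem.List.len bs) 1).foldl
        (fun (st : List Int × Int × PySem.Set Int) i =>
          if PySem.List.pyGetD bs i false then
            ((if PySem.Set.contains st.2.2 i then st.1 ++ [i] else st.1),
              st.2.1 + i,
              PySem.Set.add st.2.2 (st.2.1 + i))
          else st)
        ([], 0, PySem.Set.empty)).1)
      = PySem.Set.len (PySem.Set.inter
          (PySem.Set.ofList (PySem.List.slice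
            (((PySem.List.pyRange 2 (PySem.List.len bs) 1).filter
                (fun i => PySem.List.pyGetD bs i false)).foldl
              (fun (st : List Int × Int) q => (st.1 ++ [st.2 + q], st.2 + q)) ([], 0)).1
            (some 1) none))
          (PySem.Set.ofList ((PySem.List.pyRange 2 (PySem.List.len bs) 1).filter
            (fun i => PySem.List.pyGetD bs i false)))) := by
  set L := (PySem.List.pyRange 2 (PySem.List.len bs) 1).filter
    (fun i => PySem.List.pyGetD bs i false) with hLdef
  have hsort : L.Pairwise (· < ·) :=
    (PySem.List.pairwise_lt_pyRange_one 2 (PySem.List.len bs)).filter _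
  have hpos : ∀ q ∈ L, 2 ≤ q := by
    intro q hq
    have := List.mem_of_mem_filter hq
    exact ((PySem.List.mem_pyRange_one).mp this).1
  have hLnodup : L.Nodup := hsort.imp (fun h => ne_of_lt h)
  have hTpair : (pvPsums 0 L).Pairwise (· < ·) :=
    pv_pairwise_psums L 0 (fun q hq => by have := hpos q hq; omega)
  have hTnodup : (pvPsums 0 L).tail.Nodup := hTpair.tail.imp (fun h => ne_of_lt h)
  -- left side: A's guarded fold is the fold over the filtered list, counted by pvCountA
  rw [← List.foldl_filter (p := fun i => PySem.List.pyGetD bs i false)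
      (f := fun (st : List Int × Int × PySem.Set Int) i =>
        ((if PySem.Set.contains st.2.2 i then st.1 ++ [i] else st.1),
          st.2.1 + i, PySem.Set.add st.2.2 (st.2.1 + i)))]
  rw [← hLdef]
  -- right side: B's fold builds the prefix sums
  rw [pv_bfold L [] 0, List.nil_append, PySem.List.slice_from_one,
    PySem.Set.ofList_eq_self_of_nodup _ hTnodup, PySem.Set.ofList_eq_self_of_nodup _ hLnodup]
  have hinter : PySem.Set.inter ((pvPsums 0 L).tail) L
      = (pvPsums 0 L).tail.filter (fun a => L.contains a) := rfl
  rw [hinter]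
  have hA : ((L.foldl (fun (st : List Int × Int × PySem.Set Int) i =>
      ((if PySem.Set.contains st.2.2 i then st.1 ++ [i] else st.1),
        st.2.1 + i, PySem.Set.add st.2.2 (st.2.1 + i))) ([], 0, PySem.Set.empty)).1).length
      = pvCountA L 0 PySem.Set.empty := by
    rw [pv_afold L [] 0 PySem.Set.empty]; simp
  have hcount : pvCountA L 0 PySem.Set.empty
      = (L.filter (fun x => (pvPsums 0 L).tail.contains x)).length := by
    have := pv_countA_split L hsort hpos L [] rfl
    simpa [pvPsums] using this
  have hcomm := pv_filter_length_comm L ((pvPsums 0 L).tail) hLnodup hTnodup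
  simp only [PySem.List.len_eq, PySem.Set.len]
  rw [hA, hcount, hcomm]

-- ===== VERDICT (by name: the statement is the Claim_ definition above) =====
theorem find_primes_sieve_spec : Claim_equal_find_primes_sieve := by
  intro num _
  show find_primes_sieve num = find_primes_sieve_alt num
  unfold find_primes_sieve find_primes_sieve_alt
  exact pv_main _
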